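-- pv_equiv track=rewrite | github.com/ARJUN-BABS/Placement---Preparation | minAbsoluteDiff.py | closestValueToValue
-- ===== SOURCE A (Python) =====
-- def closestValueToValue(arr,s):
--     dp = [[0 for i in range(s+1)] for j in range(len(arr) + 1)]
--     for i in range(1,len(arr) + 1):
--         for j in range(1,s+1):
--             if(arr[i-1] <= j):
--                 dp[i][j] = max(dp[i-1][j], dp[i-1][j-arr[i-1]] + arr[i-1])
--             else:
--                 dp[i][j] = dp[i-1][j]
--     return dp[-1][-1]
-- ===== SOURCE B (Python) =====
-- def closestValueToValue(arr, s):
--     # Reachable-subset-sum set instead of a capacity-indexed DP table.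
--     reachable = {0}
--     for x in arr:
--         reachable |= {r + x for r in reachable if r + x <= s}
--     return max(reachable)
-- ===== Notes on version B (the rewrite author's own statement) =====
-- stated objective: faster
-- what changed: Replaces the (len(arr)+1) x (s+1) DP table with a set of reachable subset sums grown one element at a time: the inner loop over every capacity j disappears, work is proportional to the number of distinct reachable sums (at most min(2^len, s+1), typically far below s) instead of always n*s, and the answer is max of the set.
import Mathlib
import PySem

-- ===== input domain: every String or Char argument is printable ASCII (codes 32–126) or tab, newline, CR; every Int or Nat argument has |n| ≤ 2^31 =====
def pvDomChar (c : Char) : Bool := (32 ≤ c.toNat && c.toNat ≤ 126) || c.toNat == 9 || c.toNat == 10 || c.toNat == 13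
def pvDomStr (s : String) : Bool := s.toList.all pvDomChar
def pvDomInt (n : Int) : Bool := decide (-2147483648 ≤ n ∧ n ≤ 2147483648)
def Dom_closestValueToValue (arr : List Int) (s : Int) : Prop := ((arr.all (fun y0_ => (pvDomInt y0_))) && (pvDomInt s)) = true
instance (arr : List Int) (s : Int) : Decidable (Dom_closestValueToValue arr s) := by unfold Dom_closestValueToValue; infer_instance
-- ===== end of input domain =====

-- B replaces the capacity-indexed DP table with a set of reachable subset sums (simpler; return value only).

-- ===== PORT A =====
def closestValueToValue (arr : List Int) (s : Int) : Int :=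
  let dp : List (List Int) :=
    (PySem.List.pyRange 0 ((arr.length : Int) + 1) 1).map (fun _ =>
      (PySem.List.pyRange 0 (s + 1) 1).map (fun _ => (0 : Int)))
  let dp :=
    (PySem.List.pyRange 1 ((arr.length : Int) + 1) 1).foldl (fun dp i =>
      (PySem.List.pyRange 1 (s + 1) 1).foldl (fun dp j =>
        let ai := PySem.List.pyGetD arr (i - 1) 0
        let v : Int :=
          if ai ≤ j then
            max (PySem.List.pyGetD (PySem.List.pyGetD dp (i - 1) []) j 0)
                (PySem.List.pyGetD (PySem.List.pyGetD dp (i - 1) []) (j - ai) 0 + ai)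
          else
            PySem.List.pyGetD (PySem.List.pyGetD dp (i - 1) []) j 0
        PySem.List.pySetD dp i (PySem.List.pySetD (PySem.List.pyGetD dp i []) j v)) dp) dp
  PySem.List.pyGetD (PySem.List.pyGetD dp (-1) []) (-1) 0

-- ===== PORT B =====
def closestValueToValue_alt (arr : List Int) (s : Int) : Int :=
  let reachable : PySem.Set Int :=
    arr.foldl (fun r x =>
      PySem.Set.update r ((r.filter (fun v => decide (v + x ≤ s))).map (fun v => v + x)))
      (PySem.Set.ofList [0])
  (PySem.List.max? reachable (fun v => v)).getD 0

-- ===== PRECONDITION & SPEC =====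
-- Pre_ is exactly the set of inputs on which the Python A returns: for negative s the dp rows are
-- empty and dp[-1][-1] raises IndexError; for s ≥ 1 a negative element makes dp[i-1][j-arr[i-1]]
-- raise IndexError at j = s.
def Pre_closestValueToValue (arr : List Int) (s : Int) : Prop :=
  0 ≤ s ∧ (s = 0 ∨ ∀ x ∈ arr, 0 ≤ x)
instance (arr : List Int) (s : Int) : Decidable (Pre_closestValueToValue arr s) := by
  unfold Pre_closestValueToValue; infer_instance
def pvWitness_closestValueToValue : List Int × Int := ([3, 4, 5], 10)

def Spec_closestValueToValue (arr : List Int) (s : Int) (out : Int) : Prop := out = closestValueToValue_alt arr s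
instance (arr : List Int) (s : Int) (out : Int) : Decidable (Spec_closestValueToValue arr s out) := by unfold Spec_closestValueToValue; infer_instance

-- ===== CLAIM (what is proved, stated in full; the proofs are below) =====
def Claim_equal_closestValueToValue : Prop := ∀ (arr : List Int) (s : Int), Dom_closestValueToValue arr s → Pre_closestValueToValue arr s → Spec_closestValueToValue arr s (closestValueToValue arr s)

-- ===== LEMMAS AND PROOFS =====

-- All subset sums of p (with multiplicity), in B's growth order.
def pvSums (p : List Int) : List Int := p.foldl (fun acc x => acc ++ acc.map (· + x)) [0]

-- Max of the subset sums of p that are ≤ j (0 seed; exact max when 0 qualifies).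
def pvMleq (l : List Int) (j : Int) : Int := (l.filter (fun v => decide (v ≤ j))).foldl max 0

-- Functional form of one DP row.
def pvStepF (s : Int) (f : Int → Int) (x : Int) : Int → Int :=
  fun j => if 1 ≤ j ∧ j ≤ s then (if x ≤ j then max (f j) (f (j - x) + x) else f j) else 0

def pvRowF (s : Int) (p : List Int) : Int → Int := p.foldl (pvStepF s) (fun _ => 0)

lemma pvSums_snoc (p : List Int) (x : Int) :
    pvSums (p ++ [x]) = pvSums p ++ (pvSums p).map (· + x) := by
  simp [pvSums, List.foldl_append]

lemma zero_mem_pvSums (p : List Int) : (0 : Int) ∈ pvSums p := by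
  induction p using List.reverseRecOn with
  | nil => simp [pvSums]
  | append_singleton p x ih => rw [pvSums_snoc]; exact List.mem_append_left _ ih

lemma pvSums_nonneg (p : List Int) (hp : ∀ x ∈ p, 0 ≤ x) : ∀ v ∈ pvSums p, 0 ≤ v := by
  induction p using List.reverseRecOn with
  | nil => intro v hv; simp [pvSums] at hv; omega
  | append_singleton p x ih =>
    intro v hv
    rw [pvSums_snoc] at hv
    rcases List.mem_append.1 hv with h | h
    · exact ih (fun y hy => hp y (List.mem_append_left _ hy)) v h
    · rcases List.mem_map.1 h with ⟨w, hw, rfl⟩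
      have hx : 0 ≤ x := hp x (by simp)
      have := ih (fun y hy => hp y (List.mem_append_left _ hy)) w hw
      omega

lemma pvFoldl_max_le (l : List Int) (a j : Int) (ha : a ≤ j) (h : ∀ v ∈ l, v ≤ j) :
    l.foldl max a ≤ j := by
  rcases PySem.List.foldl_max_mem l a with h1 | h1
  · omega
  · exact h _ h1

lemma pvFoldl_max_shift (l : List Int) (a b : Int) :
    l.foldl max (max a b) = max a (l.foldl max b) := by
  induction l generalizing a b with
  | nil => rfl
  | cons x t ih => simp only [List.foldl_cons, max_assoc, ih]

lemma pvMleq_nonneg (l : List Int) (j : Int) : 0 ≤ pvMleq l j :=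
  (PySem.List.le_foldl_max _ _).1

lemma pvMleq_le (l : List Int) (j : Int) (hj : 0 ≤ j) : pvMleq l j ≤ j := by
  apply pvFoldl_max_le _ _ _ hj
  intro v hv
  have := (List.mem_filter.1 hv).2
  simpa using this

lemma pvMleq_append (l m : List Int) (j : Int) :
    pvMleq (l ++ m) j = max (pvMleq l j) (pvMleq m j) := by
  unfold pvMleq
  have h0 : (l.filter (fun v => decide (v ≤ j))).foldl max 0 =
      max ((l.filter (fun v => decide (v ≤ j))).foldl max 0) 0 := by
    have := pvMleq_nonneg l j; unfold pvMleq at this; omega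
  conv_lhs => rw [List.filter_append, List.foldl_append, h0, pvFoldl_max_shift]

lemma pvFoldl_max_eq (l : List Int) (m : Int) (hm : m ∈ l) (hub : ∀ v ∈ l, v ≤ m)
    (h0 : 0 ≤ m) : l.foldl max 0 = m := by
  have h1 := (PySem.List.le_foldl_max l 0).2 m hm
  have h2 := pvFoldl_max_le l 0 m h0 hub
  omega

-- KEY step: effect of adjoining x on pvMleq of the sums, for nonneg data.
lemma pvMleq_step (p : List Int) (x j : Int) (hx : 0 ≤ x) (_hj : 0 ≤ j)
    (hp : ∀ v ∈ p, 0 ≤ v) :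
    pvMleq (pvSums (p ++ [x])) j =
      if x ≤ j then max (pvMleq (pvSums p) j) (pvMleq (pvSums p) (j - x) + x)
      else pvMleq (pvSums p) j := by
  have hS := pvSums_nonneg p hp
  have h0S := zero_mem_pvSums p
  rw [pvSums_snoc, pvMleq_append]
  by_cases hxj : x ≤ j
  · have hmap : pvMleq ((pvSums p).map (· + x)) j = pvMleq (pvSums p) (j - x) + x := by
      unfold pvMleq
      rw [List.filter_map]
      have hpred : ((fun v => decide (v ≤ j)) ∘ (· + x)) = (fun v => decide (v ≤ j - x)) := by
        funext v; simp only [Function.comp]; rw [decide_eq_decide]; omega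
      rw [hpred]
      have h0L : (0 : Int) ∈ (pvSums p).filter (fun v => decide (v ≤ j - x)) :=
        List.mem_filter.2 ⟨h0S, by simp; omega⟩
      have hM : ((pvSums p).filter (fun v => decide (v ≤ j - x))).foldl max 0 ∈
          (pvSums p).filter (fun v => decide (v ≤ j - x)) := by
        rcases PySem.List.foldl_max_mem ((pvSums p).filter (fun v => decide (v ≤ j - x))) 0 with h | h
        · rw [h]; exact h0L
        · exact h
      apply pvFoldl_max_eq
      · exact List.mem_map_of_mem hM
      · intro u hu; rcases List.mem_map.1 hu with ⟨w, hw, rfl⟩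
        have := (PySem.List.le_foldl_max ((pvSums p).filter (fun v => decide (v ≤ j - x))) 0).2 w hw
        omega
      · have := (PySem.List.le_foldl_max ((pvSums p).filter (fun v => decide (v ≤ j - x))) 0).1
        omega
    rw [hmap]; simp [hxj]
  · have hmap : pvMleq ((pvSums p).map (· + x)) j = 0 := by
      unfold pvMleq
      have hnil : ((pvSums p).map (· + x)).filter (fun v => decide (v ≤ j)) = [] := by
        rw [List.filter_eq_nil_iff]
        intro a ha; rcases List.mem_map.1 ha with ⟨w, hw, rfl⟩
        have := hS w hw; simp; omega
      rw [hnil]; rfl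
    rw [hmap]
    have := pvMleq_nonneg (pvSums p) j
    simp [hxj]; omega

lemma pvRowF_zero (s : Int) (p : List Int) : pvRowF s p 0 = 0 := by
  induction p using List.reverseRecOn with
  | nil => rfl
  | append_singleton p x ih => simp [pvRowF, List.foldl_append, pvStepF]

lemma pvRowF_eq_pvMleq (s : Int) (p : List Int) (_hs : 0 ≤ s) (hp : ∀ v ∈ p, 0 ≤ v) :
    ∀ j, 0 ≤ j → j ≤ s → pvRowF s p j = pvMleq (pvSums p) j := by
  induction p using List.reverseRecOn with
  | nil =>
    intro j hj0 hjs
    simp [pvRowF, pvSums, pvMleq, hj0]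
  | append_singleton p x ih =>
    intro j hj0 hjs
    have hx : 0 ≤ x := hp x (by simp)
    have hp' : ∀ v ∈ p, 0 ≤ v := fun v hv => hp v (List.mem_append_left _ hv)
    have hstep : pvRowF s (p ++ [x]) j = pvStepF s (pvRowF s p) x j := by
      simp [pvRowF, List.foldl_append]
    rw [hstep, pvMleq_step p x j hx hj0 hp']
    unfold pvStepF
    by_cases hj1 : 1 ≤ j
    · simp only [hj1, hjs, and_self, if_true]
      by_cases hxj : x ≤ j
      · simp only [hxj, if_true]
        rw [ih hp' j hj0 hjs, ih hp' (j - x) (by omega) (by omega)]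
      · simp only [hxj, if_false]
        rw [ih hp' j hj0 hjs]
    · have hj : j = 0 := by omega
      subst hj
      have hM0 : pvMleq (pvSums p) 0 = 0 := by
        have h1 := pvMleq_le (pvSums p) 0 le_rfl
        have h2 := pvMleq_nonneg (pvSums p) 0
        omega
      by_cases hxj : x ≤ 0
      · have hx0 : x = 0 := by omega
        subst hx0
        simp [hM0]
      · simp [hxj, hM0]


-- ---------- A-side: the literal table loops, named ----------
def pvStepJ (arr : List Int) (_s : Int) (i : Int) (dp : List (List Int)) (j : Int) : List (List Int) :=
  let ai := PySem.List.pyGetD arr (i - 1) 0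
  let v : Int :=
    if ai ≤ j then
      max (PySem.List.pyGetD (PySem.List.pyGetD dp (i - 1) []) j 0)
          (PySem.List.pyGetD (PySem.List.pyGetD dp (i - 1) []) (j - ai) 0 + ai)
    else
      PySem.List.pyGetD (PySem.List.pyGetD dp (i - 1) []) j 0
  PySem.List.pySetD dp i (PySem.List.pySetD (PySem.List.pyGetD dp i []) j v)

def pvStepI (arr : List Int) (s : Int) (dp : List (List Int)) (i : Int) : List (List Int) :=
  (PySem.List.pyRange 1 (s + 1) 1).foldl (pvStepJ arr s i) dp

def pvZrow (s : Int) : List Int := (List.range (s.toNat + 1)).map (fun _ => (0 : Int))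

def pvCRow (s : Int) (p : List Int) : List Int :=
  (List.range (s.toNat + 1)).map (fun (jn : Nat) => pvRowF s p (jn : Int))

def pvPRow (s : Int) (p : List Int) (m : Int) : List Int :=
  (List.range (s.toNat + 1)).map (fun (jn : Nat) => if 1 ≤ jn ∧ (jn : Int) ≤ m then pvRowF s p (jn : Int) else 0)

def pvTabP (arr : List Int) (s : Int) (i : Nat) (m : Int) : List (List Int) :=
  (List.range (arr.length + 1)).map (fun r =>
    if r < i then pvCRow s (arr.take r)
    else if r = i then pvPRow s (arr.take i) m
    else pvZrow s)

def pvTab (arr : List Int) (s : Int) (k : Nat) : List (List Int) :=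
  (List.range (arr.length + 1)).map (fun r => if r ≤ k then pvCRow s (arr.take r) else pvZrow s)

lemma pvPortA_unfold (arr : List Int) (s : Int) :
    closestValueToValue arr s =
      PySem.List.pyGetD (PySem.List.pyGetD
        ((PySem.List.pyRange 1 ((arr.length : Int) + 1) 1).foldl (pvStepI arr s)
          ((PySem.List.pyRange 0 ((arr.length : Int) + 1) 1).map (fun _ =>
            (PySem.List.pyRange 0 (s + 1) 1).map (fun _ => (0 : Int)))))
        (-1) []) (-1) 0 := rfl

-- generic map-range access lemmas
lemma pvGetMapRange {α : Type} (f : Nat → α) (m : Nat) (i : Int) (d : α)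
    (h0 : 0 ≤ i) (hm : i.toNat < m) :
    PySem.List.pyGetD ((List.range m).map f) i d = f i.toNat := by
  rw [PySem.List.pyGetD_eq_getElem _ _ h0 (by simp; omega)]
  simp

lemma pvSetMapRange {α : Type} (f : Nat → α) (m : Nat) (i : Int) (v : α)
    (h0 : 0 ≤ i) (_hm : i.toNat < m) :
    PySem.List.pySetD ((List.range m).map f) i v =
      (List.range m).map (fun r => if r = i.toNat then v else f r) := by
  rw [PySem.List.pySetD_of_nonneg _ _ h0]
  apply List.ext_getElem (by simp)
  intro k h1 h2
  simp only [List.getElem_set, List.getElem_map, List.getElem_range]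
  by_cases hk : k = i.toNat
  · simp [hk]
  · simp [hk, Ne.symm hk]

lemma pvGetLastMapRange {α : Type} (f : Nat → α) (m : Nat) (d : α) (hm : 0 < m) :
    PySem.List.pyGetD ((List.range m).map f) (-1) d = f (m - 1) := by
  rw [PySem.List.pyGetD_neg_one _ _ (by simp; omega)]
  rw [List.getLast_eq_getElem]
  simp

lemma pvCRow_nil (s : Int) : pvCRow s [] = pvZrow s := by
  unfold pvCRow pvZrow
  apply List.map_congr_left
  intro jn _
  rfl

lemma pvPRow_zero (s : Int) (p : List Int) : pvPRow s p 0 = pvZrow s := by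
  unfold pvPRow pvZrow
  apply List.map_congr_left
  intro jn _
  have h : ¬ (1 ≤ jn ∧ (jn : Int) ≤ 0) := by omega
  rw [if_neg h]

lemma pvPRow_full (s : Int) (p : List Int) (hs : 0 ≤ s) : pvPRow s p s = pvCRow s p := by
  unfold pvPRow pvCRow
  apply List.map_congr_left
  intro jn hjn
  have hjn' : jn < s.toNat + 1 := List.mem_range.1 hjn
  by_cases h1 : 1 ≤ jn
  · have h2 : (jn : Int) ≤ s := by omega
    simp [h1, h2]
  · have h0 : jn = 0 := by omega
    simp [h0, pvRowF_zero]

lemma pvTabP_zero (arr : List Int) (s : Int) (i : Nat) (hi : 1 ≤ i) :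
    pvTab arr s (i - 1) = pvTabP arr s i 0 := by
  unfold pvTab pvTabP
  apply List.map_congr_left
  intro r _
  rcases lt_trichotomy r i with h | h | h
  · have : r ≤ i - 1 := by omega
    simp [this, h]
  · rw [h]
    have h1 : ¬ i ≤ i - 1 := by omega
    simp [h1, pvPRow_zero]
  · have h1 : ¬ r ≤ i - 1 := by omega
    have h2 : ¬ r < i := by omega
    have h3 : r ≠ i := by omega
    simp [h1, h2, h3]

lemma pvTabP_full (arr : List Int) (s : Int) (i : Nat) (hs : 0 ≤ s) :
    pvTabP arr s i s = pvTab arr s i := by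
  unfold pvTab pvTabP
  apply List.map_congr_left
  intro r _
  rcases lt_trichotomy r i with h | h | h
  · have : r ≤ i := by omega
    simp [this, h]
  · simp [h, pvPRow_full s _ hs]
  · have h1 : ¬ r ≤ i := by omega
    have h2 : ¬ r < i := by omega
    have h3 : r ≠ i := by omega
    simp [h1, h2, h3]

lemma pvStepJ_eq (arr : List Int) (s : Int) (i : Nat) (hi1 : 1 ≤ i) (hi2 : i ≤ arr.length)
    (hp : ∀ x ∈ arr, 0 ≤ x) (j : Int) (hj1 : 1 ≤ j) (hjs : j ≤ s) :
    pvStepJ arr s (i : Int) (pvTabP arr s i (j - 1)) j = pvTabP arr s i j := by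
  have hs : 0 ≤ s := by omega
  have hin : i - 1 < arr.length := by omega
  have hx0 : 0 ≤ arr[i - 1] := hp _ (arr.getElem_mem hin)
  have hai : PySem.List.pyGetD arr ((i : Int) - 1) 0 = arr[i - 1] := by
    rw [show (i : Int) - 1 = ((i - 1 : Nat) : Int) by omega]
    rw [PySem.List.pyGetD_eq_getElem _ _ (by omega) (by exact_mod_cast hin)]
    simp
  have hrow1 : PySem.List.pyGetD (pvTabP arr s i (j - 1)) ((i : Int) - 1) [] = pvCRow s (arr.take (i - 1)) := by
    unfold pvTabP
    rw [show (i : Int) - 1 = ((i - 1 : Nat) : Int) by omega]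
    rw [pvGetMapRange _ _ _ _ (by omega) (by simp; omega)]
    simp only [Int.toNat_natCast]
    rw [if_pos (by omega)]
  have hread : ∀ (p : List Int) (t : Int), 0 ≤ t → t ≤ s →
      PySem.List.pyGetD (pvCRow s p) t 0 = pvRowF s p t := by
    intro p t h1 h2
    unfold pvCRow
    rw [pvGetMapRange _ _ _ _ h1 (by omega)]
    rw [show ((t.toNat : Nat) : Int) = t by omega]
  have hv : (if arr[i - 1] ≤ j then
        max (pvRowF s (arr.take (i - 1)) j) (pvRowF s (arr.take (i - 1)) (j - arr[i - 1]) + arr[i - 1])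
      else pvRowF s (arr.take (i - 1)) j) = pvRowF s (arr.take i) j := by
    have htake : arr.take i = arr.take (i - 1) ++ [arr[i - 1]] := by
      conv_lhs => rw [show i = (i - 1) + 1 by omega]
      rw [List.take_add_one]
      simp [List.getElem?_eq_getElem hin]
    rw [htake]
    have hsnoc : pvRowF s (arr.take (i - 1) ++ [arr[i - 1]]) j
        = pvStepF s (pvRowF s (arr.take (i - 1))) arr[i - 1] j := by
      unfold pvRowF
      rw [List.foldl_append, List.foldl_cons, List.foldl_nil]
    rw [hsnoc]
    unfold pvStepF
    rw [if_pos (show 1 ≤ j ∧ j ≤ s from ⟨hj1, hjs⟩)]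
  have hrowi : PySem.List.pyGetD (pvTabP arr s i (j - 1)) (i : Int) [] = pvPRow s (arr.take i) (j - 1) := by
    unfold pvTabP
    rw [pvGetMapRange _ _ _ _ (by omega) (by simp; omega)]
    simp only [Int.toNat_natCast]
    rw [if_neg (by omega)]
    simp
  have hsetrow : PySem.List.pySetD (pvPRow s (arr.take i) (j - 1)) j (pvRowF s (arr.take i) j)
      = pvPRow s (arr.take i) j := by
    unfold pvPRow
    rw [pvSetMapRange _ _ _ _ (by omega) (by omega)]
    apply List.map_congr_left
    intro jn _
    by_cases h : jn = j.toNat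
    · subst h
      rw [if_pos rfl, if_pos (by constructor <;> omega)]
      rw [show ((j.toNat : Nat) : Int) = j by omega]
    · rw [if_neg h]
      by_cases h2 : 1 ≤ jn ∧ (jn : Int) ≤ j - 1
      · rw [if_pos h2, if_pos ⟨h2.1, by omega⟩]
      · have h3 : ¬ (1 ≤ jn ∧ (jn : Int) ≤ j) := by
          intro hc
          exact h2 ⟨hc.1, by omega⟩
        rw [if_neg h2, if_neg h3]
  have hsettab : PySem.List.pySetD (pvTabP arr s i (j - 1)) (i : Int) (pvPRow s (arr.take i) j)
      = pvTabP arr s i j := by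
    unfold pvTabP
    rw [pvSetMapRange _ _ _ _ (by omega) (by simp; omega)]
    simp only [Int.toNat_natCast]
    apply List.map_congr_left
    intro r _
    by_cases h : r = i
    · subst h
      rw [if_pos rfl, if_neg (lt_irrefl r), if_pos rfl]
    · rw [if_neg h]
      by_cases h2 : r < i
      · rw [if_pos h2, if_pos h2]
      · rw [if_neg h2, if_neg h2, if_neg h, if_neg h]
  have hstep : pvStepJ arr s (i : Int) (pvTabP arr s i (j - 1)) j =
      PySem.List.pySetD (pvTabP arr s i (j - 1)) (i : Int)
        (PySem.List.pySetD (PySem.List.pyGetD (pvTabP arr s i (j - 1)) (i : Int) []) j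
          (if PySem.List.pyGetD arr ((i : Int) - 1) 0 ≤ j then
              max (PySem.List.pyGetD (PySem.List.pyGetD (pvTabP arr s i (j - 1)) ((i : Int) - 1) []) j 0)
                  (PySem.List.pyGetD (PySem.List.pyGetD (pvTabP arr s i (j - 1)) ((i : Int) - 1) [])
                    (j - PySem.List.pyGetD arr ((i : Int) - 1) 0) 0 + PySem.List.pyGetD arr ((i : Int) - 1) 0)
            else PySem.List.pyGetD (PySem.List.pyGetD (pvTabP arr s i (j - 1)) ((i : Int) - 1) []) j 0)) := rfl
  rw [hstep, hai, hrow1, hrowi]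
  by_cases hxj : arr[i - 1] ≤ j
  · rw [if_pos hxj, hread _ j (by omega) hjs, hread _ (j - arr[i - 1]) (by omega) (by omega)]
    rw [show max (pvRowF s (arr.take (i - 1)) j) (pvRowF s (arr.take (i - 1)) (j - arr[i - 1]) + arr[i - 1])
          = pvRowF s (arr.take i) j from by rw [← hv, if_pos hxj]]
    rw [hsetrow, hsettab]
  · rw [if_neg hxj, hread _ j (by omega) hjs]
    rw [show pvRowF s (arr.take (i - 1)) j = pvRowF s (arr.take i) j from by rw [← hv, if_neg hxj]]
    rw [hsetrow, hsettab]

lemma pvInnerFold (arr : List Int) (s : Int) (i : Nat) (hi1 : 1 ≤ i) (hi2 : i ≤ arr.length)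
    (hp : ∀ x ∈ arr, 0 ≤ x) :
    ∀ mN : Nat, (mN : Int) ≤ s →
      (PySem.List.pyRange 1 ((mN : Int) + 1) 1).foldl (pvStepJ arr s (i : Int)) (pvTabP arr s i 0)
        = pvTabP arr s i (mN : Int) := by
  intro mN
  induction mN with
  | zero =>
    intro _
    rw [show ((0 : Nat) : Int) + 1 = 1 by norm_num, PySem.List.pyRange_one_eq_nil le_rfl]
    simp
  | succ k ih =>
    intro hle
    have hk : (k : Int) ≤ s := by push_cast at hle ⊢; omega
    have hsplit : PySem.List.pyRange 1 (((k + 1 : Nat) : Int) + 1) 1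
        = PySem.List.pyRange 1 ((k : Int) + 1) 1 ++ [(k : Int) + 1] := by
      push_cast
      exact PySem.List.pyRange_one_succ_right (by omega)
    rw [hsplit, List.foldl_append, List.foldl_cons, List.foldl_nil, ih hk]
    have := pvStepJ_eq arr s i hi1 hi2 hp ((k : Int) + 1) (by omega) (by push_cast at hle; omega)
    rw [show (k : Int) + 1 - 1 = (k : Int) by ring] at this
    rw [this]
    push_cast
    rfl

lemma pvStepI_eq (arr : List Int) (s : Int) (i : Nat) (hi1 : 1 ≤ i) (hi2 : i ≤ arr.length)
    (hp : ∀ x ∈ arr, 0 ≤ x) (hs : 0 ≤ s) :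
    pvStepI arr s (pvTab arr s (i - 1)) (i : Int) = pvTab arr s i := by
  unfold pvStepI
  rw [pvTabP_zero arr s i hi1]
  have hcast : s = ((s.toNat : Nat) : Int) := by omega
  calc (PySem.List.pyRange 1 (s + 1) 1).foldl (pvStepJ arr s (i : Int)) (pvTabP arr s i 0)
      = (PySem.List.pyRange 1 (((s.toNat : Nat) : Int) + 1) 1).foldl (pvStepJ arr s (i : Int)) (pvTabP arr s i 0) := by rw [← hcast]
    _ = pvTabP arr s i ((s.toNat : Nat) : Int) := pvInnerFold arr s i hi1 hi2 hp s.toNat (by omega)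
    _ = pvTabP arr s i s := by rw [← hcast]
    _ = pvTab arr s i := pvTabP_full arr s i hs

lemma pvOuterFold (arr : List Int) (s : Int) (hp : ∀ x ∈ arr, 0 ≤ x) (hs : 0 ≤ s) :
    ∀ kN : Nat, kN ≤ arr.length →
      (PySem.List.pyRange 1 ((kN : Int) + 1) 1).foldl (pvStepI arr s) (pvTab arr s 0)
        = pvTab arr s kN := by
  intro kN
  induction kN with
  | zero =>
    intro _
    rw [show ((0 : Nat) : Int) + 1 = 1 by norm_num, PySem.List.pyRange_one_eq_nil le_rfl]
    simp
  | succ k ih =>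
    intro hle
    have hsplit : PySem.List.pyRange 1 (((k + 1 : Nat) : Int) + 1) 1
        = PySem.List.pyRange 1 ((k : Int) + 1) 1 ++ [(k : Int) + 1] := by
      push_cast
      exact PySem.List.pyRange_one_succ_right (by omega)
    rw [hsplit, List.foldl_append, List.foldl_cons, List.foldl_nil, ih (by omega)]
    have h1 : ((k : Int) + 1) = ((k + 1 : Nat) : Int) := by push_cast; ring
    rw [h1]
    have := pvStepI_eq arr s (k + 1) (by omega) hle hp hs
    rw [show k + 1 - 1 = k from rfl] at this
    exact this

lemma pvDp0 (arr : List Int) (s : Int) (hs : 0 ≤ s) :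
    (PySem.List.pyRange 0 ((arr.length : Int) + 1) 1).map (fun _ =>
      (PySem.List.pyRange 0 (s + 1) 1).map (fun _ => (0 : Int))) = pvTab arr s 0 := by
  have hlen1 : (PySem.List.pyRange 0 (s + 1) 1).length = s.toNat + 1 := by
    rw [PySem.List.length_pyRange_one]; omega
  have hlen2 : (PySem.List.pyRange 0 ((arr.length : Int) + 1) 1).length = arr.length + 1 := by
    rw [PySem.List.length_pyRange_one]; omega
  have hz : (PySem.List.pyRange 0 (s + 1) 1).map (fun _ => (0 : Int)) = pvZrow s := by
    unfold pvZrow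
    rw [List.map_const', List.map_const', hlen1, List.length_range]
  simp only [hz]
  unfold pvTab
  have hcongr : ∀ r ∈ List.range (arr.length + 1),
      (if r ≤ 0 then pvCRow s (arr.take r) else pvZrow s) = pvZrow s := by
    intro r _
    by_cases h : r ≤ 0
    · have hr0 : r = 0 := by omega
      simp [hr0, pvCRow_nil]
    · simp [h]
  rw [List.map_congr_left hcongr, List.map_const', List.map_const', hlen2, List.length_range]

lemma pvPortA_eq (arr : List Int) (s : Int) (hs : 0 ≤ s) (hp : ∀ x ∈ arr, 0 ≤ x) :
    closestValueToValue arr s = pvMleq (pvSums arr) s := by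
  rw [pvPortA_unfold, pvDp0 arr s hs, pvOuterFold arr s hp hs arr.length le_rfl]
  unfold pvTab
  rw [pvGetLastMapRange _ _ _ (by omega)]
  simp only [Nat.add_sub_cancel, le_refl, if_true, List.take_length]
  unfold pvCRow
  rw [pvGetLastMapRange _ _ _ (by omega)]
  simp only [Nat.add_sub_cancel]
  rw [show ((s.toNat : Nat) : Int) = s by omega]
  exact pvRowF_eq_pvMleq s arr hs hp s hs le_rfl

lemma pvPortA_s0 (arr : List Int) : closestValueToValue arr 0 = 0 := by
  rw [pvPortA_unfold, pvDp0 arr 0 le_rfl]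
  have hid : ∀ (dp : List (List Int)) (i : Int), i ∈ PySem.List.pyRange 1 ((arr.length : Int) + 1) 1 →
      pvStepI arr 0 dp i = dp := by
    intro dp i _
    unfold pvStepI
    rw [show (0 : Int) + 1 = 1 by norm_num, PySem.List.pyRange_one_eq_nil le_rfl]
    rfl
  rw [PySem.List.foldl_congr_mem _ (pvStepI arr 0) (fun dp _ => dp) _ hid, PySem.List.foldl_ignore _ _]
  unfold pvTab
  rw [pvGetLastMapRange _ _ _ (by omega)]
  simp only [Nat.add_sub_cancel]
  have hrow : (if arr.length ≤ 0 then pvCRow 0 (arr.take arr.length) else pvZrow 0) = pvZrow 0 := by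
    by_cases h : arr.length ≤ 0
    · have : arr = [] := by
        cases arr with
        | nil => rfl
        | cons a t => simp at h
      simp [this, pvCRow_nil]
    · simp [h]
  rw [hrow]
  decide

-- ---------- B-side: the reachable-sums set ----------
def pvReach (arr : List Int) (s : Int) : PySem.Set Int :=
  arr.foldl (fun r x =>
    PySem.Set.update r ((r.filter (fun v => decide (v + x ≤ s))).map (fun v => v + x)))
    (PySem.Set.ofList [0])

lemma pvPortB_unfold (arr : List Int) (s : Int) :
    closestValueToValue_alt arr s = (PySem.List.max? (pvReach arr s) (fun v => v)).getD 0 := rfl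

lemma pvReach_snoc (p : List Int) (x s : Int) :
    pvReach (p ++ [x]) s =
      PySem.Set.update (pvReach p s)
        (((pvReach p s).filter (fun v => decide (v + x ≤ s))).map (fun v => v + x)) := by
  simp [pvReach, List.foldl_append]

lemma zero_mem_pvReach (arr : List Int) (s : Int) : (0 : Int) ∈ pvReach arr s := by
  induction arr using List.reverseRecOn with
  | nil =>
    show (0 : Int) ∈ PySem.Set.ofList [0]
    rw [PySem.Set.mem_ofList _ _]; simp
  | append_singleton p x ih =>
    rw [pvReach_snoc, PySem.Set.mem_update _ _ _]
    exact Or.inl ih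

lemma pvReach_sub (arr : List Int) (s : Int) (hs : 0 ≤ s) :
    ∀ v ∈ pvReach arr s, v ∈ pvSums arr ∧ v ≤ s := by
  induction arr using List.reverseRecOn with
  | nil =>
    intro v hv
    have : v ∈ [(0 : Int)] := (PySem.Set.mem_ofList _ _).1 hv
    simp at this
    subst this
    exact ⟨zero_mem_pvSums [], hs⟩
  | append_singleton p x ih =>
    intro v hv
    rw [pvReach_snoc, PySem.Set.mem_update _ _ _] at hv
    rw [pvSums_snoc]
    rcases hv with h | h
    · obtain ⟨h1, h2⟩ := ih v h
      exact ⟨List.mem_append_left _ h1, h2⟩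
    · obtain ⟨w, hw, rfl⟩ := List.mem_map.1 h
      obtain ⟨hw1, hw2⟩ := List.mem_filter.1 hw
      obtain ⟨hs1, _⟩ := ih w hw1
      refine ⟨List.mem_append_right _ (List.mem_map_of_mem hs1), ?_⟩
      simpa using hw2

lemma pvReach_sup (arr : List Int) (s : Int) (_hs : 0 ≤ s) (hp : ∀ x ∈ arr, 0 ≤ x) :
    ∀ v, v ∈ pvSums arr → v ≤ s → v ∈ pvReach arr s := by
  induction arr using List.reverseRecOn with
  | nil =>
    intro v hv _
    have : v = 0 := by simpa [pvSums] using hv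
    subst this
    show (0 : Int) ∈ PySem.Set.ofList [0]
    rw [PySem.Set.mem_ofList _ _]; simp
  | append_singleton p x ih =>
    intro v hv hvs
    have hx : 0 ≤ x := hp x (by simp)
    have hp' : ∀ y ∈ p, 0 ≤ y := fun y hy => hp y (List.mem_append_left _ hy)
    rw [pvSums_snoc] at hv
    rw [pvReach_snoc, PySem.Set.mem_update _ _ _]
    rcases List.mem_append.1 hv with h | h
    · exact Or.inl (ih hp' v h hvs)
    · obtain ⟨w, hw, rfl⟩ := List.mem_map.1 h
      have hwle : w ≤ s := by omega
      have hwr : w ∈ pvReach p s := ih hp' w hw hwle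
      refine Or.inr (List.mem_map.2 ⟨w, List.mem_filter.2 ⟨hwr, by simpa⟩, rfl⟩)

-- ===== VERDICT (by name: the statement is the Claim_ definition above) =====
theorem closestValueToValue_spec : Claim_equal_closestValueToValue := by
  unfold Claim_equal_closestValueToValue
  intro arr s _ hpre
  unfold Spec_closestValueToValue
  obtain ⟨hs, hcase⟩ := hpre
  have hne : pvReach arr s ≠ [] := List.ne_nil_of_mem (zero_mem_pvReach arr s)
  obtain ⟨m, hm⟩ : ∃ m, PySem.List.max? (pvReach arr s) (fun v => v) = some m := by
    cases h : PySem.List.max? (pvReach arr s) (fun v => v) with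
    | none => exact absurd ((PySem.List.max?_eq_none_iff _ _).1 h) hne
    | some m => exact ⟨m, rfl⟩
  have hmmem : m ∈ pvReach arr s := PySem.List.max?_mem hm
  have hmub : ∀ y ∈ pvReach arr s, y ≤ m := PySem.List.max?_isMax hm
  have hBm : closestValueToValue_alt arr s = m := by rw [pvPortB_unfold, hm]; rfl
  by_cases hnn : ∀ x ∈ arr, 0 ≤ x
  · rw [pvPortA_eq arr s hs hnn, hBm]
    have h1 : pvMleq (pvSums arr) s ≤ m := by
      rcases PySem.List.foldl_max_mem ((pvSums arr).filter (fun v => decide (v ≤ s))) 0 with h | h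
      · unfold pvMleq
        rw [h]
        exact hmub 0 (zero_mem_pvReach arr s)
      · obtain ⟨hmem1, hmem2⟩ := List.mem_filter.1 h
        exact hmub _ (pvReach_sup arr s hs hnn _ hmem1 (by simpa using hmem2))
    have h2 : m ≤ pvMleq (pvSums arr) s := by
      obtain ⟨hm1, hm2⟩ := pvReach_sub arr s hs m hmmem
      exact (PySem.List.le_foldl_max _ _).2 m (List.mem_filter.2 ⟨hm1, by simpa⟩)
    omega
  · have hs0 : s = 0 := by
      rcases hcase with h | h
      · exact h
      · exact absurd h hnn
    subst hs0
    have hle := (pvReach_sub arr 0 le_rfl m hmmem).2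
    have h0 := hmub 0 (zero_mem_pvReach arr 0)
    rw [pvPortA_s0, hBm]
    omega
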